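-- pv_equiv track=rewrite | github.com/eastsidekillas/RealitySNIHunter | core/networking.py | auto_ip_range
-- ===== SOURCE A (Python) =====
-- import ipaddress
--
-- def auto_ip_range(base_ip: str, extended: bool = False) -> list:
--     """Генерация списка IP адресов в диапазоне."""
--     try:
--         ip_obj = ipaddress.IPv4Address(base_ip)
--         network = ipaddress.IPv4Network(f"{base_ip}/24", strict=False)
--
--         if extended:
--             # Расширенный диапазон: все IP в /24 сети
--             return [str(ip) for ip in network.hosts()]
--         else:
--             # Стандартный диапазон: ±5 IP от базового
--             base_int = int(ip_obj)
--             ips = []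
--             for offset in range(-5, 6):
--                 try:
--                     new_ip = ipaddress.IPv4Address(base_int + offset)
--                     if new_ip in network:
--                         ips.append(str(new_ip))
--                 except:
--                     continue
--             return ips
--     except:
--         return [base_ip]
-- ===== SOURCE B (Python) =====
-- import re
--
-- _OCTET = r'(25[0-5]|2[0-4]\d|1\d\d|[1-9]?\d)'
-- _IPV4_RE = re.compile(r'{o}\.{o}\.{o}\.{o}'.format(o=_OCTET))
--
-- def _ip_str(n: int) -> str:
--     return '.'.join(str((n >> s) & 255) for s in (24, 16, 8, 0))
--
-- def auto_ip_range(base_ip: str, extended: bool = False) -> list: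
--     """Генерация списка IP адресов в диапазоне."""
--     m = _IPV4_RE.fullmatch(base_ip)
--     if m is None:
--         return [base_ip]
--     a, b, c, d = map(int, m.groups())
--     base_int = (a << 24) | (b << 16) | (c << 8) | d
--     net_low = base_int - base_int % 256
--     if extended:
--         return [_ip_str(i) for i in range(net_low + 1, net_low + 255)]
--     low = max(base_int - 5, net_low)
--     high = min(base_int + 5, net_low + 255)
--     return [_ip_str(i) for i in range(low, high + 1)]
-- ===== Notes on version B (the rewrite author's own statement) =====
-- stated objective: simpler
-- what changed: Validates the address once with the standard strict-IPv4 regex, then replaces A's fixed -5..+5 offset loop with its per-offset exception guard and network-membership test by computing the clamped window [max(base-5,net_low), min(base+5,net_low+255)] arithmetically and emitting it in one range pass; no network object, no inner try/except.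
import Mathlib
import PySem

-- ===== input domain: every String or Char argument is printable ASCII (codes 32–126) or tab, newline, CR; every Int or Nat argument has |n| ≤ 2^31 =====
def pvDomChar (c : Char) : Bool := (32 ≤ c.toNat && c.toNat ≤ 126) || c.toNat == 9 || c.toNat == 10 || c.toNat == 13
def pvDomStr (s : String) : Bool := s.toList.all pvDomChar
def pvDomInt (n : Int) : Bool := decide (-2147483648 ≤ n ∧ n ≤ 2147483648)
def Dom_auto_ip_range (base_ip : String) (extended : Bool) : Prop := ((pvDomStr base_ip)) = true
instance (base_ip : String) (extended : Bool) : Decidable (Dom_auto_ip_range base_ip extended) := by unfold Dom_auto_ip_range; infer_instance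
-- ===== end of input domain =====

-- B replaces A's fixed -5..+5 offset loop with per-element membership test and
-- exception guard by an arithmetically clamped window [max(base-5,net), min(base+5,net+255)]
-- rendered in one pass; objective: simpler.

-- Shared library model: ipaddress.IPv4Address(str) parsing (CPython _parse_octet,
-- exact on the ASCII domain) and str(IPv4Address(int)) formatting.
def parseOctet? (cs : List Char) : Option Nat :=
  if cs.isEmpty then none
  else if !(cs.all Char.isDigit) then none
  else if 3 < cs.length then none
  else if cs ≠ ['0'] ∧ cs.headD ' ' = '0' then none
  else if 255 < cs.foldl (fun a c => 10 * a + (c.toNat - 48)) 0 then none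
  else some (cs.foldl (fun a c => 10 * a + (c.toNat - 48)) 0)

def parseIPv4? (s : String) : Option Nat :=
  match s.toList.splitOn '.' with
  | [p1, p2, p3, p4] =>
    match parseOctet? p1, parseOctet? p2, parseOctet? p3, parseOctet? p4 with
    | some a, some b, some c, some d => some (((a * 256 + b) * 256 + c) * 256 + d)
    | _, _, _, _ => none
  | _ => none

def ipToStr (n : Nat) : String :=
  PySem.Int.toStr (n / 16777216) ++ "." ++ PySem.Int.toStr ((n / 65536) % 256) ++ "." ++
    PySem.Int.toStr ((n / 256) % 256) ++ "." ++ PySem.Int.toStr (n % 256)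

-- ===== PORT A =====
def auto_ip_range (base_ip : String) (extended : Bool) : List String :=
  match parseIPv4? base_ip with
  | none => [base_ip]                       -- except: return [base_ip]
  | some base =>
    -- network = IPv4Network(f"{base_ip}/24", strict=False); its network address
    let net : Nat := base - base % 256
    if extended then
      -- [str(ip) for ip in network.hosts()]
      (PySem.List.pyRange ((net : Int) + 1) ((net : Int) + 255)).map (fun i => ipToStr i.toNat)
    else
      (PySem.List.pyRange (-5) 6).foldl (fun ips offset =>
        let newIp : Int := (base : Int) + offset
        if 0 ≤ newIp ∧ newIp ≤ 4294967295 then   -- try: IPv4Address(base_int + offset)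
          if (net : Int) ≤ newIp ∧ newIp ≤ (net : Int) + 255 then  -- new_ip in network
            ips ++ [ipToStr newIp.toNat]
          else ips
        else ips) []                              -- except: continue

-- ===== PORT B =====
def auto_ip_range_alt (base_ip : String) (extended : Bool) : List String :=
  match parseIPv4? base_ip with
  | none => [base_ip]
  | some base =>
    let netLow : Int := (base : Int) - PySem.Int.mod (base : Int) 256
    if extended then
      (PySem.List.pyRange (netLow + 1) (netLow + 255)).map (fun i => ipToStr i.toNat)
    else
      let low : Int := max ((base : Int) - 5) netLow
      let high : Int := min ((base : Int) + 5) (netLow + 255)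
      (PySem.List.pyRange low (high + 1)).map (fun i => ipToStr i.toNat)

-- ===== PRECONDITION & SPEC =====
def Spec_auto_ip_range (base_ip : String) (extended : Bool) (out : List String) : Prop := out = auto_ip_range_alt base_ip extended
instance (base_ip : String) (extended : Bool) (out : List String) : Decidable (Spec_auto_ip_range base_ip extended out) := by unfold Spec_auto_ip_range; infer_instance

-- ===== CLAIM (what is proved, stated in full; the proofs are below) =====
def Claim_equal_auto_ip_range : Prop := ∀ (base_ip : String) (extended : Bool), Dom_auto_ip_range base_ip extended → Spec_auto_ip_range base_ip extended (auto_ip_range base_ip extended)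

-- ===== LEMMAS AND PROOFS =====

lemma pyRange_nil {a b : Int} (h : b ≤ a) : PySem.List.pyRange a b = [] := by
  apply List.eq_nil_iff_forall_not_mem.mpr
  intro x hx
  rw [PySem.List.mem_pyRange_one] at hx
  omega

lemma pyRange_shift_aux (n b : Int) : ∀ (k : Nat) (a : Int), (b - a).toNat = k →
    PySem.List.pyRange (n + a) (n + b) = (PySem.List.pyRange a b).map (fun o => n + o) := by
  intro k
  induction k with
  | zero =>
    intro a h
    rw [pyRange_nil (by omega), pyRange_nil (by omega : b ≤ a)]
    rfl
  | succ k ih =>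
    intro a h
    rw [PySem.List.pyRange_one_cons (by omega : a < b),
        PySem.List.pyRange_one_cons (by omega : n + a < n + b), List.map_cons,
        show n + a + 1 = n + (a + 1) by ring, ih (a + 1) (by omega)]

lemma pyRange_shift (n a b : Int) :
    PySem.List.pyRange (n + a) (n + b) = (PySem.List.pyRange a b).map (fun o => n + o) :=
  pyRange_shift_aux n b _ a rfl

lemma filter_pyRange (lo hi : Int) : ∀ (k : Nat) (a b : Int), (b - a).toNat = k →
    (PySem.List.pyRange a b).filter (fun o => decide (lo ≤ o ∧ o ≤ hi)) =
      PySem.List.pyRange (max a lo) (min b (hi + 1)) := by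
  intro k
  induction k with
  | zero =>
    intro a b h
    rw [pyRange_nil (by omega : b ≤ a), pyRange_nil (by omega)]
    rfl
  | succ k ih =>
    intro a b h
    rw [PySem.List.pyRange_one_cons (by omega : a < b), List.filter_cons]
    by_cases hc : lo ≤ a ∧ a ≤ hi
    · rw [if_pos (by simpa using hc), ih (a + 1) b (by omega),
          show max (a + 1) lo = a + 1 by omega,
          show max a lo = a by omega,
          PySem.List.pyRange_one_cons (by omega : a < min b (hi + 1))]
    · rw [if_neg (by simpa using hc), ih (a + 1) b (by omega)]
      by_cases h2 : a < lo
      · congr 1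
        omega
      · rw [pyRange_nil (by omega), pyRange_nil (by omega)]

lemma parseOctet?_le (cs : List Char) (v : Nat) (h : parseOctet? cs = some v) : v ≤ 255 := by
  unfold parseOctet? at h
  split_ifs at h with h1 h2 h3 h4 h5
  all_goals first
    | exact Option.noConfusion h
    | (rw [Option.some.injEq] at h; omega)

lemma parseIPv4?_lt (s : String) (n : Nat) (h : parseIPv4? s = some n) : n < 4294967296 := by
  unfold parseIPv4? at h
  split at h
  case _ p1 p2 p3 p4 _ =>
    split at h
    case _ a b c d ha hb hc hd =>
      injection h with h
      have := parseOctet?_le _ _ ha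
      have := parseOctet?_le _ _ hb
      have := parseOctet?_le _ _ hc
      have := parseOctet?_le _ _ hd
      omega
    case _ => exact absurd h (by simp)
  case _ => exact absurd h (by simp)

-- ===== VERDICT (by name: the statement is the Claim_ definition above) =====
set_option maxRecDepth 8192 in
theorem auto_ip_range_spec : Claim_equal_auto_ip_range := by
  intro base_ip extended _
  unfold Spec_auto_ip_range auto_ip_range auto_ip_range_alt
  cases hp : parseIPv4? base_ip with
  | none => rfl
  | some base =>
    have hb : base < 4294967296 := parseIPv4?_lt _ _ hp
    have hmod : PySem.Int.mod (base : Int) 256 = ((base % 256 : Nat) : Int) := by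
      rw [PySem.Int.mod_eq_emod_of_pos (show (0:Int) < 256 by norm_num)]
      omega
    have hnet : ((base : Int) - PySem.Int.mod (base : Int) 256) = ((base - base % 256 : Nat) : Int) := by
      rw [hmod]; omega
    dsimp only
    rw [hnet]
    cases extended with
    | true => simp only [if_pos trivial]
    | false =>
      simp only [Bool.false_eq_true, if_false]
      -- turn A's guarded fold into an append-if fold with a Bool predicate
      have hfun : (fun (ips : List String) (offset : Int) =>
          if 0 ≤ (base : Int) + offset ∧ (base : Int) + offset ≤ 4294967295 then
            if (((base - base % 256 : Nat) : Int)) ≤ (base : Int) + offset ∧ (base : Int) + offset ≤ (((base - base % 256 : Nat) : Int)) + 255 then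
              ips ++ [ipToStr ((base : Int) + offset).toNat]
            else ips
          else ips) =
          (fun (ips : List String) (offset : Int) =>
            if (fun o => decide ((((base - base % 256 : Nat) : Int)) - (base : Int) ≤ o ∧
                o ≤ (((base - base % 256 : Nat) : Int)) + 255 - (base : Int))) offset = true then
              ips ++ [(fun o => ipToStr ((base : Int) + o).toNat) offset]
            else ips) := by
        funext ips o
        simp only [decide_eq_true_eq]
        by_cases h1 : 0 ≤ (base : Int) + o ∧ (base : Int) + o ≤ 4294967295
        · by_cases h2 : (((base - base % 256 : Nat) : Int)) ≤ (base : Int) + o ∧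
              (base : Int) + o ≤ (((base - base % 256 : Nat) : Int)) + 255
          · rw [if_pos h1, if_pos h2, if_pos (by omega)]
          · rw [if_pos h1, if_neg h2, if_neg (by omega)]
        · rw [if_neg h1, if_neg (by omega)]
      rw [hfun, PySem.List.foldl_append_if, List.nil_append,
          filter_pyRange _ _ 11 (-5) 6 (by decide),
          show max ((base : Int) - 5) (((base - base % 256 : Nat) : Int)) =
            (base : Int) + max (-5) ((((base - base % 256 : Nat) : Int)) - (base : Int)) by omega,
          show min ((base : Int) + 5) ((((base - base % 256 : Nat) : Int)) + 255) + 1 =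
            (base : Int) + min 6 ((((base - base % 256 : Nat) : Int)) + 255 - (base : Int) + 1) by omega,
          pyRange_shift, List.map_map]
      rfl
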